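-- pv_equiv track=rewrite | github.com/djachenko/adventofcode | 2024/21/star2.py | filter_shortest
-- ===== SOURCE A (Python) =====
-- from typing import Dict, List
--
-- def filter_shortest(strings: List[str]) -> List[str]:
--     if not strings:
--         return []
--
--     result = []
--     min_length = len(strings[0])
--
--     for string in strings:
--         current_length = len(string)
--
--         if current_length < min_length:
--             result = []
--             min_length = current_length
--
--         if current_length == min_length:
--             result.append(string)
--
--     return result
-- ===== SOURCE B (Python) =====
-- from typing import Dict, List
--
-- def filter_shortest(strings: List[str]) -> List[str]:
--     if not strings:
--         return []
--     m = min(len(s) for s in strings)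
--     return [s for s in strings if len(s) == m]
-- ===== Notes on version B (the rewrite author's own statement) =====
-- stated objective: simpler
-- what changed: Replaces A's single-pass scan that maintains a result list and resets it whenever a shorter string appears with a two-pass compute-min-then-filter: first min(len(s)) over the list, then a comprehension keeping strings of that length.
import Mathlib
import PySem

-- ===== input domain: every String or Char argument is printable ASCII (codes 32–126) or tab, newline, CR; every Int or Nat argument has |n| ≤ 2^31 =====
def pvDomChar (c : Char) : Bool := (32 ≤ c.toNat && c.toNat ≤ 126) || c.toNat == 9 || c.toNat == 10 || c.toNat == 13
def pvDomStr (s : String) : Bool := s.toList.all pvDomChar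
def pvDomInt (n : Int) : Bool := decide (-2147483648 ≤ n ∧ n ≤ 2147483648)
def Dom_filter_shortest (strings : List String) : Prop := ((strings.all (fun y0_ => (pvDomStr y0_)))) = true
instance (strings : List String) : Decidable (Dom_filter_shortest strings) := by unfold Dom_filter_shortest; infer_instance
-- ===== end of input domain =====

-- B replaces A's scan-with-reset by a two-pass compute-min-then-filter (simpler decomposition, same O(n) cost).

-- ===== PORT A =====
-- the loop body of A: maybe reset result and min_length, then maybe append
def pvStepA (st : List String × Int) (string : String) : List String × Int :=
  let current_length := PySem.Str.len string
  let st' := if current_length < st.2 then (([] : List String), current_length) else st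
  if current_length = st'.2 then (st'.1 ++ [string], st'.2) else st'

def filter_shortest (strings : List String) : List String :=
  match strings with
  | [] => []
  | s0 :: _ =>
    (strings.foldl pvStepA (([] : List String), PySem.Str.len s0)).1

-- ===== PORT B =====
def filter_shortest_alt (strings : List String) : List String :=
  match strings with
  | [] => []
  | s0 :: rest =>
    let m := (rest.map PySem.Str.len).foldl min (PySem.Str.len s0)
    strings.filter (fun s => PySem.Str.len s = m)

-- ===== PRECONDITION & SPEC =====
def Spec_filter_shortest (strings : List String) (out : List String) : Prop := out = filter_shortest_alt strings
instance (strings : List String) (out : List String) : Decidable (Spec_filter_shortest strings out) := by unfold Spec_filter_shortest; infer_instance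

-- ===== CLAIM (what is proved, stated in full; the proofs are below) =====
def Claim_equal_filter_shortest : Prop := ∀ (strings : List String), Dom_filter_shortest strings → Spec_filter_shortest strings (filter_shortest strings)

-- ===== LEMMAS AND PROOFS =====

theorem pvFoldMin_le (xs : List Int) (m : Int) : xs.foldl min m ≤ m := by
  induction xs generalizing m with
  | nil => simp
  | cons x t ih => exact le_trans (ih (min m x)) (min_le_left _ _)

-- the scan-with-reset loop computes the running min and the filter of the processed list
theorem pvLoopA (ys : List String) (res : List String) (m : Int) :
    ys.foldl pvStepA (res, m) =
      ((if (ys.map (fun s => (s.length : Int))).foldl min m = m then res else []) ++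
        ys.filter (fun t => (t.length : Int) = (ys.map (fun s => (s.length : Int))).foldl min m),
       (ys.map (fun s => (s.length : Int))).foldl min m) := by
  induction ys generalizing res m with
  | nil => simp
  | cons y t ih =>
    simp only [List.map, List.foldl, List.filter_cons]
    by_cases hlt : (y.length : Int) < m
    · -- reset: state becomes ([y], len y)
      have hstep : pvStepA (res, m) y = ([y], (y.length : Int)) := by
        simp [pvStepA, PySem.Str.len_eq, hlt]
      have hmin : min m (y.length : Int) = (y.length : Int) := by omega
      rw [hstep, ih]
      simp only [hmin]
      have hle : (t.map (fun s => (s.length : Int))).foldl min (y.length : Int) ≤ (y.length : Int) :=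
        pvFoldMin_le _ _
      set M := (t.map (fun s => (s.length : Int))).foldl min (y.length : Int) with hM
      have hMm : ¬ M = m := by omega
      by_cases hy : (y.length : Int) = M
      · simp [hy.symm]
        intro h; exact absurd h (by omega)
      · simp [hy]
        rw [if_neg (fun h : M = (y.length : Int) => hy h.symm), if_neg hMm]
    · by_cases heq : (y.length : Int) = m
      · -- append
        have hstep : pvStepA (res, m) y = (res ++ [y], m) := by
          simp [pvStepA, PySem.Str.len_eq, heq]
        have hmin : min m (y.length : Int) = m := by omega
        rw [hstep, ih]
        simp only [hmin]
        set M := (t.map (fun s => (s.length : Int))).foldl min m with hM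
        by_cases hMm : M = m
        · simp [hMm, heq]
        · simp [hMm, heq]
          omega
      · -- skip
        have hstep : pvStepA (res, m) y = (res, m) := by
          simp [pvStepA, PySem.Str.len_eq, hlt, heq]
        have hmin : min m (y.length : Int) = m := by omega
        rw [hstep, ih]
        simp only [hmin]
        set M := (t.map (fun s => (s.length : Int))).foldl min m with hM
        have hle : M ≤ m := pvFoldMin_le _ _
        have hy : ¬ (y.length : Int) = M := by omega
        simp [hy]

-- ===== VERDICT (by name: the statement is the Claim_ definition above) =====
theorem filter_shortest_spec : Claim_equal_filter_shortest := by
  intro strings _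
  unfold Spec_filter_shortest filter_shortest filter_shortest_alt
  match strings with
  | [] => rfl
  | s0 :: rest =>
    simp only [PySem.Str.len_eq, String.length_toList]
    have h0 : pvStepA (([] : List String), (s0.length : Int)) s0 = ([s0], (s0.length : Int)) := by
      simp [pvStepA, PySem.Str.len_eq]
    rw [List.foldl_cons, h0, pvLoopA]
    set M := (rest.map (fun s => (s.length : Int))).foldl min (s0.length : Int) with hM
    have hle : M ≤ (s0.length : Int) := pvFoldMin_le _ _
    have hmap : List.map PySem.Str.len rest = rest.map (fun s => ((s.length : Nat) : Int)) :=
      List.map_congr_left fun s _ => by simp [PySem.Str.len_eq]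
    simp only [List.filter_cons, hmap, ← hM]
    by_cases hMm : M = (s0.length : Int)
    · simp [hMm]
    · simp [hMm]
      omega
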